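-- pv_equiv track=rewrite | github.com/AldoEZ/CPCFI | Sexta_Generacion_CPCFI/propedeutico/contest_final/F_ Joysticks.py | solve
-- ===== SOURCE A (Python) =====
-- def solve(a1, a2, cont):
--     if a1 <= 1 or a2 <= 1:
--         return 0
--     elif (a1 == 2 and a2 == 2) or (a1 == 2 and a2 < 2) or (a2 == 2 and a1 < 2):
--         return 1
--     elif a1 >= a2:
--         while a1 > 2:
--             a1 -= 2
--             a2 += 1
--             cont += 1
--         return cont + solve(a1, a2, 0)
--     elif a2 > a1:
--         while a2 > 2:
--             a2 -= 2
--             a1 += 1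
--             cont += 1
--         return cont + solve(a1, a2, 0)
-- ===== SOURCE B (Python) =====
-- def solve(a1, a2, cont):
--     if a1 <= 1 or a2 <= 1:
--         return 0
--     if a1 == 2 and a2 == 2:
--         return 1
--     total = cont
--     while True:
--         if a2 <= a1:
--             k = (a1 - 1) // 2
--             a1, a2 = a1 - 2 * k, a2 + k
--         else:
--             k = (a2 - 1) // 2
--             a1, a2 = a1 + k, a2 - 2 * k
--         total += k
--         if a1 <= 1 or a2 <= 1:
--             return total
--         if a1 == 2 and a2 == 2:
--             return total + 1
-- ===== Notes on version B (the rewrite author's own statement) =====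
-- stated objective: faster
-- what changed: Replaces A's unit-step while loops (subtract 2 / add 1 per minute) and recursion with a single iterative loop that collapses each whole draining phase into one division step k=(max-1)//2.
import Mathlib
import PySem

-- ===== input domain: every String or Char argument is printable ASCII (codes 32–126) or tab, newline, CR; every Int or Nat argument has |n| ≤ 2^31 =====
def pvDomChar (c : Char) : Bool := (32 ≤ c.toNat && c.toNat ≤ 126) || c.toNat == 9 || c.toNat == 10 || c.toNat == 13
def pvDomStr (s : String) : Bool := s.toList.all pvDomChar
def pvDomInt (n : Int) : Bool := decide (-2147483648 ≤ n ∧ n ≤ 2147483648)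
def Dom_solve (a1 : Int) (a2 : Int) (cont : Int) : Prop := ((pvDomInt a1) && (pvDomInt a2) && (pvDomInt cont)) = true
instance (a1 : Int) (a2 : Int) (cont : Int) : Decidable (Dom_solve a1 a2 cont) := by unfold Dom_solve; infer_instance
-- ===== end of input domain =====

-- B replaces A's unit-step while loops and recursion by one loop taking a whole
-- draining phase per iteration via k = (max-1)//2; objective: faster (asymptotic).

-- ===== PORT A =====
-- named termination lemma for the inner loops (cited by decreasing_by)
theorem drain_dec (a : Int) (h : a > 2) : (a - 2).toNat < a.toNat := by omega

-- A's first inner loop: while a1 > 2: a1 -= 2; a2 += 1; cont += 1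
def drainA (a1 : Int) (a2 : Int) (cont : Int) : Int × Int × Int :=
  if _h : a1 > 2 then drainA (a1 - 2) (a2 + 1) (cont + 1) else (a1, a2, cont)
termination_by a1.toNat
decreasing_by exact drain_dec a1 _h

-- A's second inner loop: while a2 > 2: a2 -= 2; a1 += 1; cont += 1
def drainB (a1 : Int) (a2 : Int) (cont : Int) : Int × Int × Int :=
  if _h : a2 > 2 then drainB (a1 + 1) (a2 - 2) (cont + 1) else (a1, a2, cont)
termination_by a2.toNat
decreasing_by exact drain_dec a2 _h

-- A's recursion, with a fuel guard making it total; fuel (a1+a2).toNat + 1 is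
-- proved sufficient below (each recursive call strictly decreases a1 + a2)
def solveGo (fuel : Nat) (a1 : Int) (a2 : Int) (cont : Int) : Int :=
  match fuel with
  | 0 => 0
  | fuel + 1 =>
    if a1 ≤ 1 ∨ a2 ≤ 1 then 0
    else if (a1 = 2 ∧ a2 = 2) ∨ (a1 = 2 ∧ a2 < 2) ∨ (a2 = 2 ∧ a1 < 2) then 1
    else if a1 ≥ a2 then
      (drainA a1 a2 cont).2.2 + solveGo fuel (drainA a1 a2 cont).1 (drainA a1 a2 cont).2.1 0
    else if a2 > a1 then
      (drainB a1 a2 cont).2.2 + solveGo fuel (drainB a1 a2 cont).1 (drainB a1 a2 cont).2.1 0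
    else 0  -- unreachable: a1 ≥ a2 ∨ a2 > a1 always holds

def solve (a1 : Int) (a2 : Int) (cont : Int) : Int :=
  solveGo ((a1 + a2).toNat + 1) a1 a2 cont

-- ===== PORT B =====
-- the 'while True' loop of Source B, with the same kind of fuel guard (sufficiency
-- proved below); k = (a1 - 1) // 2 resp. (a2 - 1) // 2 of Source B is inlined
def loopAltGo (fuel : Nat) (a1 : Int) (a2 : Int) (total : Int) : Int :=
  match fuel with
  | 0 => total
  | fuel + 1 =>
    if a2 ≤ a1 then
      if a1 - 2 * PySem.Int.floordiv (a1 - 1) 2 ≤ 1 ∨ a2 + PySem.Int.floordiv (a1 - 1) 2 ≤ 1 then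
        total + PySem.Int.floordiv (a1 - 1) 2
      else if a1 - 2 * PySem.Int.floordiv (a1 - 1) 2 = 2 ∧ a2 + PySem.Int.floordiv (a1 - 1) 2 = 2 then
        total + PySem.Int.floordiv (a1 - 1) 2 + 1
      else loopAltGo fuel (a1 - 2 * PySem.Int.floordiv (a1 - 1) 2) (a2 + PySem.Int.floordiv (a1 - 1) 2) (total + PySem.Int.floordiv (a1 - 1) 2)
    else
      if a1 + PySem.Int.floordiv (a2 - 1) 2 ≤ 1 ∨ a2 - 2 * PySem.Int.floordiv (a2 - 1) 2 ≤ 1 then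
        total + PySem.Int.floordiv (a2 - 1) 2
      else if a1 + PySem.Int.floordiv (a2 - 1) 2 = 2 ∧ a2 - 2 * PySem.Int.floordiv (a2 - 1) 2 = 2 then
        total + PySem.Int.floordiv (a2 - 1) 2 + 1
      else loopAltGo fuel (a1 + PySem.Int.floordiv (a2 - 1) 2) (a2 - 2 * PySem.Int.floordiv (a2 - 1) 2) (total + PySem.Int.floordiv (a2 - 1) 2)

def solve_alt (a1 : Int) (a2 : Int) (cont : Int) : Int :=
  if a1 ≤ 1 ∨ a2 ≤ 1 then 0
  else if a1 = 2 ∧ a2 = 2 then 1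
  else loopAltGo ((a1 + a2).toNat + 1) a1 a2 cont

-- ===== PRECONDITION & SPEC =====
def Spec_solve (a1 : Int) (a2 : Int) (cont : Int) (out : Int) : Prop := out = solve_alt a1 a2 cont
instance (a1 : Int) (a2 : Int) (cont : Int) (out : Int) : Decidable (Spec_solve a1 a2 cont out) := by unfold Spec_solve; infer_instance

-- ===== CLAIM (what is proved, stated in full; the proofs are below) =====
def Claim_equal_solve : Prop := ∀ (a1 : Int) (a2 : Int) (cont : Int), Dom_solve a1 a2 cont → Spec_solve a1 a2 cont (solve a1 a2 cont)

-- ===== LEMMAS AND PROOFS =====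

-- closed forms of A's inner loops
theorem drainA_closed_aux (n : Nat) : ∀ (a1 a2 cont : Int), a1.toNat ≤ n → 2 ≤ a1 →
    drainA a1 a2 cont = (a1 - 2 * ((a1 - 1) / 2), a2 + (a1 - 1) / 2, cont + (a1 - 1) / 2) := by
  induction n with
  | zero => intro a1 _ _ hn h; omega
  | succ n ih =>
    intro a1 a2 cont hn h
    by_cases h1 : a1 > 2
    · rw [drainA, dif_pos h1]
      by_cases h2 : 2 ≤ a1 - 2
      · rw [ih _ _ _ (by omega) h2, Prod.mk.injEq, Prod.mk.injEq]
        refine ⟨by omega, by omega, by omega⟩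
      · have ha : a1 = 3 := by omega
        subst ha
        rw [drainA, dif_neg (by norm_num), Prod.mk.injEq, Prod.mk.injEq]
        norm_num
    · rw [drainA, dif_neg h1, Prod.mk.injEq, Prod.mk.injEq]
      refine ⟨by omega, by omega, by omega⟩

theorem drainA_closed (a1 a2 cont : Int) (h : 2 ≤ a1) :
    drainA a1 a2 cont = (a1 - 2 * ((a1 - 1) / 2), a2 + (a1 - 1) / 2, cont + (a1 - 1) / 2) :=
  drainA_closed_aux a1.toNat a1 a2 cont le_rfl h

theorem drainB_closed_aux (n : Nat) : ∀ (a1 a2 cont : Int), a2.toNat ≤ n → 2 ≤ a2 →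
    drainB a1 a2 cont = (a1 + (a2 - 1) / 2, a2 - 2 * ((a2 - 1) / 2), cont + (a2 - 1) / 2) := by
  induction n with
  | zero => intro _ a2 _ hn h; omega
  | succ n ih =>
    intro a1 a2 cont hn h
    by_cases h1 : a2 > 2
    · rw [drainB, dif_pos h1]
      by_cases h2 : 2 ≤ a2 - 2
      · rw [ih _ _ _ (by omega) h2, Prod.mk.injEq, Prod.mk.injEq]
        refine ⟨by omega, by omega, by omega⟩
      · have ha : a2 = 3 := by omega
        subst ha
        rw [drainB, dif_neg (by norm_num), Prod.mk.injEq, Prod.mk.injEq]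
        norm_num
    · rw [drainB, dif_neg h1, Prod.mk.injEq, Prod.mk.injEq]
      refine ⟨by omega, by omega, by omega⟩

theorem drainB_closed (a1 a2 cont : Int) (h : 2 ≤ a2) :
    drainB a1 a2 cont = (a1 + (a2 - 1) / 2, a2 - 2 * ((a2 - 1) / 2), cont + (a2 - 1) / 2) :=
  drainB_closed_aux a2.toNat a1 a2 cont le_rfl h

-- loopAltGo's accumulator 'total' shifts out of the result (any fuel)
theorem loopAlt_shift (n : Nat) : ∀ (a1 a2 s t : Int),
    loopAltGo n a1 a2 (s + t) = s + loopAltGo n a1 a2 t := by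
  induction n with
  | zero => intro a1 a2 s t; rfl
  | succ n ih =>
    intro a1 a2 s t
    rw [loopAltGo, loopAltGo]
    have e1 : PySem.Int.floordiv (a1 - 1) 2 = (a1 - 1) / 2 :=
      PySem.Int.floordiv_eq_ediv_of_pos (by norm_num)
    have e2 : PySem.Int.floordiv (a2 - 1) 2 = (a2 - 1) / 2 :=
      PySem.Int.floordiv_eq_ediv_of_pos (by norm_num)
    rw [e1, e2]
    split_ifs <;> try omega
    · rw [show s + t + (a1 - 1) / 2 = s + (t + (a1 - 1) / 2) by ring]
      exact ih _ _ s _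
    · rw [show s + t + (a2 - 1) / 2 = s + (t + (a2 - 1) / 2) by ring]
      exact ih _ _ s _

-- core: on states with both ≥ 2 and not (2,2), A's recursion equals B's loop,
-- for any sufficient fuels on both sides
theorem solveGo_eq_loopAltGo (n : Nat) : ∀ (m : Nat) (a1 a2 c : Int),
    (a1 + a2).toNat < n → (a1 + a2).toNat < m → 2 ≤ a1 → 2 ≤ a2 →
    ¬(a1 = 2 ∧ a2 = 2) → solveGo n a1 a2 c = loopAltGo m a1 a2 c := by
  induction n with
  | zero => intro m a1 a2 c hn hm h1 h2 h3; omega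
  | succ n ih =>
    intro m a1 a2 c hn hm h1 h2 h3
    cases m with
    | zero => omega
    | succ m =>
      have e1 : PySem.Int.floordiv (a1 - 1) 2 = (a1 - 1) / 2 :=
        PySem.Int.floordiv_eq_ediv_of_pos (by norm_num)
      have e2 : PySem.Int.floordiv (a2 - 1) 2 = (a2 - 1) / 2 :=
        PySem.Int.floordiv_eq_ediv_of_pos (by norm_num)
      by_cases hc : a2 ≤ a1
      · have ha1 : 3 ≤ a1 := by omega
        have hk1 : 1 ≤ (a1 - 1) / 2 := by omega
        rw [solveGo, if_neg (by omega), if_neg (by omega), if_pos (by omega : a1 ≥ a2),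
          drainA_closed a1 a2 c (by omega)]
        dsimp only
        rw [loopAltGo, if_pos hc, e1]
        by_cases hx : a1 - 2 * ((a1 - 1) / 2) ≤ 1
        · rw [if_pos (Or.inl hx)]
          cases n with
          | zero => omega
          | succ n => rw [solveGo, if_pos (Or.inl hx)]; omega
        · have hx2 : a1 - 2 * ((a1 - 1) / 2) = 2 := by omega
          rw [if_neg (by omega), if_neg (by omega),
            ih m _ _ 0 (by omega) (by omega) (by omega) (by omega) (by omega)]
          have hs := loopAlt_shift m (a1 - 2 * ((a1 - 1) / 2)) (a2 + (a1 - 1) / 2) (c + (a1 - 1) / 2) 0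
          rw [add_zero] at hs
          exact hs.symm
      · have ha2 : 3 ≤ a2 := by omega
        have hk2 : 1 ≤ (a2 - 1) / 2 := by omega
        rw [solveGo, if_neg (by omega), if_neg (by omega), if_neg (by omega : ¬ a1 ≥ a2),
          if_pos (by omega : a2 > a1), drainB_closed a1 a2 c (by omega)]
        dsimp only
        rw [loopAltGo, if_neg hc, e2]
        by_cases hy : a2 - 2 * ((a2 - 1) / 2) ≤ 1
        · rw [if_pos (Or.inr hy)]
          cases n with
          | zero => omega
          | succ n => rw [solveGo, if_pos (Or.inr hy)]; omega
        · have hy2 : a2 - 2 * ((a2 - 1) / 2) = 2 := by omega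
          rw [if_neg (by omega), if_neg (by omega),
            ih m _ _ 0 (by omega) (by omega) (by omega) (by omega) (by omega)]
          have hs := loopAlt_shift m (a1 + (a2 - 1) / 2) (a2 - 2 * ((a2 - 1) / 2)) (c + (a2 - 1) / 2) 0
          rw [add_zero] at hs
          exact hs.symm

-- ===== VERDICT (by name: the statement is the Claim_ definition above) =====
theorem solve_spec : Claim_equal_solve := by
  intro a1 a2 c _
  unfold Spec_solve solve solve_alt
  by_cases hb : a1 ≤ 1 ∨ a2 ≤ 1
  · rw [solveGo, if_pos hb, if_pos hb]
  · by_cases h22 : a1 = 2 ∧ a2 = 2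
    · rw [solveGo, if_neg hb, if_pos (Or.inl h22), if_neg hb, if_pos h22]
    · rw [if_neg hb, if_neg h22]
      exact solveGo_eq_loopAltGo _ _ a1 a2 c (by omega) (by omega) (by omega) (by omega) h22
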